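-- pv_equiv track=rewrite | github.com/sssungjin/Algorithm | 백준/Silver/1308. D－Day/D－Day.py | year_to_day
-- ===== SOURCE A (Python) =====
-- def is_leap(year):
--     # 4로 나눠지면 윤년
--     if year % 4 == 0:
--         # 4로 나눠지고 400으로 안나눠지면서 100으로 나눠지면 평년
--         if year % 100 == 0 and year % 400 != 0:
--             return False
--         else:
--             return True
--     else:
--         return False
--
-- def year_to_day(year):
--     day = 0
--     for i in range(1, year):
--         if is_leap(i):
--             day += 366
--         else:
--             day += 365
--
--     return day
-- ===== SOURCE B (Python) =====
-- def year_to_day(year):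
--     n = max(year - 1, 0)
--     return 365 * n + n // 4 - n // 100 + n // 400
-- ===== Notes on version B (the rewrite author's own statement) =====
-- stated objective: faster
-- what changed: Replaces the per-year accumulation loop with a closed-form Gregorian day count: a linear term plus the leap-year count obtained from three floor divisions.
import Mathlib
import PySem

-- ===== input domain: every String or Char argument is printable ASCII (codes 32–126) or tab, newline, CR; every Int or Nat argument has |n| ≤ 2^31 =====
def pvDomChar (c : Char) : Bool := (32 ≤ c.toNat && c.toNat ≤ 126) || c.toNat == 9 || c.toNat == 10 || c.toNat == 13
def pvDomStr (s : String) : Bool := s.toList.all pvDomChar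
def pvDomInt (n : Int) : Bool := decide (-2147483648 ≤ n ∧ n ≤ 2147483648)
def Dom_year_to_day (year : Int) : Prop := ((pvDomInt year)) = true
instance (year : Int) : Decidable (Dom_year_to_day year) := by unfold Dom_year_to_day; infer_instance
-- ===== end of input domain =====

-- B replaces A's per-year loop with the closed-form count 365*n + n//4 - n//100 + n//400 (n = max(year-1,0)); objective: faster (O(1) vs O(year)).

-- ===== PORT A =====
def is_leap (year : Int) : Bool :=
  if PySem.Int.mod year 4 == 0 then
    if PySem.Int.mod year 100 == 0 && !(PySem.Int.mod year 400 == 0) then false else true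
  else false

def year_to_day (year : Int) : Int :=
  (PySem.List.pyRange 1 year 1).foldl
    (fun day i => if is_leap i then day + 366 else day + 365) 0

-- ===== PORT B =====
def year_to_day_alt (year : Int) : Int :=
  let n := max (year - 1) 0
  365 * n + PySem.Int.floordiv n 4 - PySem.Int.floordiv n 100 + PySem.Int.floordiv n 400

-- ===== PRECONDITION & SPEC =====
def Spec_year_to_day (year : Int) (out : Int) : Prop := out = year_to_day_alt year
instance (year : Int) (out : Int) : Decidable (Spec_year_to_day year out) := by unfold Spec_year_to_day; infer_instance

-- ===== CLAIM (what is proved, stated in full; the proofs are below) =====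
def Claim_equal_year_to_day : Prop := ∀ (year : Int), Dom_year_to_day year → Spec_year_to_day year (year_to_day year)

-- ===== LEMMAS AND PROOFS =====

theorem alt_nonpos (year : Int) (h : year ≤ 1) : year_to_day_alt year = 0 := by
  simp [year_to_day_alt, max_eq_right (by omega : year - 1 ≤ 0)]

theorem step_eq (m : Int) (hm : 1 ≤ m) :
    year_to_day_alt m + (if is_leap m then 366 else 365) = year_to_day_alt (m + 1) := by
  simp only [year_to_day_alt, is_leap,
    max_eq_left (by omega : (0:Int) ≤ m - 1), max_eq_left (by omega : (0:Int) ≤ m + 1 - 1)]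
  rw [PySem.Int.floordiv_eq_ediv_of_pos (by norm_num), PySem.Int.floordiv_eq_ediv_of_pos (by norm_num),
      PySem.Int.floordiv_eq_ediv_of_pos (by norm_num), PySem.Int.floordiv_eq_ediv_of_pos (by norm_num),
      PySem.Int.floordiv_eq_ediv_of_pos (by norm_num), PySem.Int.floordiv_eq_ediv_of_pos (by norm_num)]
  simp only [PySem.Int.mod_eq_emod_of_pos (by norm_num : (0:Int) < 4),
    PySem.Int.mod_eq_emod_of_pos (by norm_num : (0:Int) < 100),
    PySem.Int.mod_eq_emod_of_pos (by norm_num : (0:Int) < 400)]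
  split_ifs with h1 h2 <;> simp_all <;> omega

theorem loop_eq (n : Nat) : year_to_day (1 + n) = year_to_day_alt (1 + n) := by
  induction n with
  | zero =>
    simp [year_to_day, PySem.List.pyRange_one_eq_nil (by norm_num : (1:Int) ≤ 1)]
    rw [alt_nonpos 1 (by norm_num)]
  | succ k ih =>
    have h : (1 : Int) + (k + 1 : Nat) = (1 + (k : Int)) + 1 := by push_cast; ring
    rw [h]
    unfold year_to_day
    rw [PySem.List.pyRange_one_succ_right (by omega : (1:Int) ≤ 1 + (k:Int)), List.foldl_append]
    unfold year_to_day at ih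
    rw [ih]
    simp only [List.foldl_cons, List.foldl_nil]
    have := step_eq (1 + (k:Int)) (by omega)
    split_ifs at this ⊢ <;> omega

-- ===== VERDICT (by name: the statement is the Claim_ definition above) =====
theorem year_to_day_spec : Claim_equal_year_to_day := by
  intro year _
  unfold Spec_year_to_day
  by_cases h : year ≤ 1
  · rw [alt_nonpos year h]
    simp [year_to_day, PySem.List.pyRange_one_eq_nil h]
  · have h1 : 1 ≤ year - 1 := by omega
    obtain ⟨n, hn⟩ : ∃ n : Nat, year = 1 + (n : Int) := ⟨(year - 1).toNat, by omega⟩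
    rw [hn]; exact loop_eq n
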